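-- pv_equiv track=rewrite | github.com/ChasonJiang/PyNES | src/executor.py | decimal_to_bcd
-- ===== SOURCE A (Python) =====
-- def decimal_to_bcd(decimal):
--     """Convert Decimal to BCD (Binary Coded Decimal)."""
--     bcd = 0
--     shift = 0
--     while decimal > 0:
--         bcd |= (decimal % 10) << shift
--         decimal //= 10
--         shift += 4
--     return bcd
-- ===== SOURCE B (Python) =====
-- def decimal_to_bcd(decimal):
--     """Convert Decimal to BCD (Binary Coded Decimal)."""
--     if decimal <= 0:
--         return 0
--     return 16 * decimal_to_bcd(decimal // 10) + decimal % 10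
-- ===== Notes on version B (the rewrite author's own statement) =====
-- stated objective: simpler
-- what changed: Replaces the iterative shift-and-OR accumulation with its explicit bcd/shift state by a direct recursion on the leading digits: the BCD of a number is its last decimal digit plus the BCD of the remaining digits moved one nibble up via a multiply, so no bit operations and no shift counter are needed.
import Mathlib
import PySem

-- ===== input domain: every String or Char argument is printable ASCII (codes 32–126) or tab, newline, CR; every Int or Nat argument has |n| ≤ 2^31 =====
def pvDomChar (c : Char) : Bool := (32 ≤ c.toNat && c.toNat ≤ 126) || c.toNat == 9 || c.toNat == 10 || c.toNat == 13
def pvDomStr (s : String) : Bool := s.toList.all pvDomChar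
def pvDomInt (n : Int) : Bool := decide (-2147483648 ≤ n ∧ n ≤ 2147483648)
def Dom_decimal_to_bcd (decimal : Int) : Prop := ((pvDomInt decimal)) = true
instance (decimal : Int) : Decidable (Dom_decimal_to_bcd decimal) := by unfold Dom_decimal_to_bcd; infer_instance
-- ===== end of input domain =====

-- B replaces A's iterative shift-and-OR accumulation by a direct recursion on the
-- leading digits (16 * bcd(n // 10) + n % 10): simpler, no bit operations or shift counter.


-- ===== PORT A =====
-- A's while loop as structural recursion on the loop state (bcd, shift).
-- shift is a Nat: it starts at 0 and only ever grows by 4, and Lean's `<<<` on Int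
-- takes a Nat shift amount (PySem: Python's n << k IS Lean's n <<< k for k : Nat).
def decimal_to_bcd_loopA (decimal bcd : Int) (shift : Nat) : Int :=
  if decimal > 0 then
    decimal_to_bcd_loopA (PySem.Int.floordiv decimal 10)
      (PySem.Int.bor bcd ((PySem.Int.mod decimal 10) <<< shift)) (shift + 4)
  else bcd
termination_by decimal.toNat
decreasing_by
  rw [PySem.Int.floordiv_eq_ediv_of_pos (by norm_num)]
  omega

def decimal_to_bcd (decimal : Int) : Int := decimal_to_bcd_loopA decimal 0 0

-- ===== PORT B =====
def decimal_to_bcd_alt (decimal : Int) : Int :=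
  if decimal ≤ 0 then 0
  else 16 * decimal_to_bcd_alt (PySem.Int.floordiv decimal 10) + PySem.Int.mod decimal 10
termination_by decimal.toNat
decreasing_by
  rw [PySem.Int.floordiv_eq_ediv_of_pos (by norm_num)]
  omega

-- ===== PRECONDITION & SPEC =====
def Spec_decimal_to_bcd (decimal : Int) (out : Int) : Prop := out = decimal_to_bcd_alt decimal
instance (decimal : Int) (out : Int) : Decidable (Spec_decimal_to_bcd decimal out) := by unfold Spec_decimal_to_bcd; infer_instance

-- ===== CLAIM (what is proved, stated in full; the proofs are below) =====
def Claim_equal_decimal_to_bcd : Prop := ∀ (decimal : Int), Dom_decimal_to_bcd decimal → Spec_decimal_to_bcd decimal (decimal_to_bcd decimal)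

-- ===== LEMMAS AND PROOFS =====

-- OR of a value below 2^s with a value shifted left by s is plain addition (Nat level).
lemma pv_lor_shiftLeft_eq_add (a b s : Nat) (h : a < 2 ^ s) :
    a ||| (b <<< s) = a + b * 2 ^ s := by
  have hrhs : a + b * 2 ^ s = 2 ^ s * b + a := by ring
  rw [hrhs]
  apply Nat.eq_of_testBit_eq
  intro j
  rw [Nat.testBit_lor, Nat.testBit_shiftLeft, Nat.testBit_two_pow_mul_add b h j]
  by_cases hj : j < s
  · simp [hj, Nat.not_le.mpr hj]
  · have hs : s ≤ j := Nat.le_of_not_lt hj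
    have ha : a.testBit j = false :=
      Nat.testBit_lt_two_pow (lt_of_lt_of_le h (Nat.pow_le_pow_right (by norm_num) hs))
    simp [hj, hs, ha]

-- Loop invariant: A's loop adds B's value, shifted, onto the accumulator.
lemma pv_loopA_eq (k : Nat) : ∀ (n bcd : Int) (shift : Nat), n.toNat ≤ k → 0 ≤ bcd →
    bcd < 2 ^ shift →
    decimal_to_bcd_loopA n bcd shift = bcd + decimal_to_bcd_alt n * 2 ^ shift := by
  induction k with
  | zero =>
    intro n bcd shift hk _ _
    have hn : ¬ n > 0 := by omega
    rw [decimal_to_bcd_loopA, decimal_to_bcd_alt]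
    simp [hn, show n ≤ 0 by omega]
  | succ k ih =>
    intro n bcd shift hk hb0 hbs
    by_cases hn : n > 0
    · have h10 : (0:Int) < 10 := by norm_num
      set m := PySem.Int.mod n 10 with hm
      have hm0 : 0 ≤ m := PySem.Int.mod_nonneg _ h10
      have hm10 : m < 10 := PySem.Int.mod_lt _ h10
      -- the OR in A's loop is an addition
      have hsh : m <<< shift = ((m.toNat <<< shift : Nat) : Int) := by
        rw [Int.natCast_shiftLeft, Int.toNat_of_nonneg hm0]
      have hbor : PySem.Int.bor bcd (m <<< shift) = bcd + m * 2 ^ shift := by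
        have hbn : bcd.toNat < 2 ^ shift := by exact_mod_cast (by rwa [Int.toNat_of_nonneg hb0] : (bcd.toNat : Int) < 2 ^ shift)
        rw [hsh, show bcd = ((bcd.toNat : Nat) : Int) by rw [Int.toNat_of_nonneg hb0]]
        rw [PySem.Int.bor_natCast, pv_lor_shiftLeft_eq_add _ _ _ hbn]
        push_cast [Nat.shiftLeft_eq, Int.toNat_of_nonneg hb0, Int.toNat_of_nonneg hm0]
        ring
      have hq0 : 0 ≤ PySem.Int.floordiv n 10 := by
        rw [PySem.Int.floordiv_eq_ediv_of_pos h10]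
        exact Int.ediv_nonneg (by omega) (by norm_num)
      have hqlt : (PySem.Int.floordiv n 10).toNat ≤ k := by
        rw [PySem.Int.floordiv_eq_ediv_of_pos h10]
        omega
      have hpow : (0:Int) < 2 ^ shift := by positivity
      have hbnd : bcd + m * 2 ^ shift < 2 ^ (shift + 4) := by
        have : (2:Int) ^ (shift + 4) = 16 * 2 ^ shift := by rw [pow_add]; ring
        rw [this]; nlinarith
      have hb0' : 0 ≤ bcd + m * 2 ^ shift := by positivity
      rw [decimal_to_bcd_loopA]
      simp only [hn, if_pos]
      rw [← hm, hbor, ih _ _ _ hqlt hb0' hbnd]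
      conv_rhs => rw [decimal_to_bcd_alt]
      rw [if_neg (show ¬ n ≤ 0 by omega), ← hm, pow_add]
      ring
    · rw [decimal_to_bcd_loopA, decimal_to_bcd_alt]
      simp [hn, show n ≤ 0 by omega]

-- ===== VERDICT (by name: the statement is the Claim_ definition above) =====
theorem decimal_to_bcd_spec : Claim_equal_decimal_to_bcd := by
  intro decimal _
  unfold Spec_decimal_to_bcd decimal_to_bcd
  rw [pv_loopA_eq decimal.toNat decimal 0 0 le_rfl le_rfl (by norm_num)]
  ring
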